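-- pv_equiv track=rewrite | github.com/YunSung-Choi97/Problem-Solving-for-studying-DataStructure-and-Algorithm | Chap11_Greedy/Q06.py | solution
-- ===== SOURCE A (Python) =====
-- def solution(food_times, k):
--
--     if sum(food_times) <= k:
--         answer = -1
--
--     else:
--         N = len(food_times)
--         i = 0
--         while k > 0:
--             if food_times[i] != 0:
--                 food_times[i] -= 1
--                 k -= 1
--             if i == N - 1:
--                 i = 0
--             else:
--                 i += 1
--
--         while food_times[i] == 0:
--             if i == N - 1:
--                 i = 0
--             else:
--                 i += 1
--
--         answer = i + 1
--
--     return answer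
-- ===== SOURCE B (Python) =====
-- def solution(food_times, k):
--     # Different algorithm: skip whole rounds in bulk (min-positive / k//n), no pointer simulation.
--     # Note: A mutates food_times in place; B does not (equivalence is about the return value).
--     if sum(food_times) <= k:
--         return -1
--     lst = food_times
--     n = sum(1 for t in lst if t != 0)
--     while k >= n:
--         d = min(min(t for t in lst if t > 0), k // n)
--         lst = [t - d if t != 0 else t for t in lst]
--         k -= d * n
--         n = sum(1 for t in lst if t != 0)
--     for i, t in enumerate(lst):
--         if t != 0:
--             if k <= 0:
--                 return i + 1
--             k -= 1
-- ===== Notes on version B (the rewrite author's own statement) =====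
-- stated objective: alternative
-- what changed: B replaces A's one-bite-at-a-time round-robin pointer simulation (one loop iteration per unit of k) by bulk round-skipping: each pass subtracts d = min(min positive remaining time, k // n) from every non-empty dish at once and removes d*n from k, then a single scan finds the remaining dish; Pre_ excludes only inputs where A never returns (k < 0 with every dish zero loops forever, k < 0 with an empty list raises IndexError).
import Mathlib
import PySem

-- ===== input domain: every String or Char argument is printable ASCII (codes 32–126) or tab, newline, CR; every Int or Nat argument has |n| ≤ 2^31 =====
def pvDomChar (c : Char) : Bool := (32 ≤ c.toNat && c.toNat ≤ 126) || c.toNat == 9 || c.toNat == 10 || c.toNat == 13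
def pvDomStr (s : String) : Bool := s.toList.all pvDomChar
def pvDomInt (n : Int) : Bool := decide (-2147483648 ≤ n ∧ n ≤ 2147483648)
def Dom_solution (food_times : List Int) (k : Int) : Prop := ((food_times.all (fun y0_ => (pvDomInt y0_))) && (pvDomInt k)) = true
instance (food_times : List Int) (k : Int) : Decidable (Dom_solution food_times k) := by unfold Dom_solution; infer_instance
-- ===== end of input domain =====

-- B replaces A's one-bite-at-a-time pointer simulation by bulk round-skipping driven by the
-- minimum positive remaining time and k // n (a different algorithm; not measured faster here).
-- A mutates food_times in place; B does not (the equivalence proved is about the return value).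

-- ===== PORT A =====
-- Python: `while k > 0: … food_times[i] -= 1 …` with wrap-around index i.  The fuel argument only
-- makes the recursion total; the proofs below show it is large enough on every admitted input.
-- `lst.getD i 0` is Python's food_times[i] (i stays in range on admitted inputs; the out-of-range
-- IndexError case is excluded by Pre_solution).
def loop1 (N : Nat) (lst : List Int) (k : Int) (i : Nat) : Nat → List Int × Int × Nat
  | 0 => (lst, k, i)
  | fuel+1 =>
    if 0 < k then
      let p := lst.getD i 0
      loop1 N (if p ≠ 0 then lst.set i (p - 1) else lst)
              (if p ≠ 0 then k - 1 else k)
              (if i = N - 1 then 0 else i + 1) fuel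
    else (lst, k, i)

-- Python: `while food_times[i] == 0: …` (wrap-around scan for the next non-empty dish)
def loop2 (N : Nat) (lst : List Int) (i : Nat) : Nat → Nat
  | 0 => i
  | fuel+1 => if lst.getD i 0 = 0 then loop2 N lst (if i = N - 1 then 0 else i + 1) fuel else i

def solution (food_times : List Int) (k : Int) : Int :=
  if food_times.sum ≤ k then -1
  else
    let N := food_times.length
    let st := loop1 N food_times k 0 ((k.toNat + 1) * (N + 1))
    let i2 := loop2 N st.1 st.2.2 (N + 1)
    (i2 : Int) + 1

-- ===== PORT B =====
-- Python: `for i, t in enumerate(lst): if t != 0: …` (the loop falls off only outside Pre_solution,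
-- where Python returns None; 0 stands in for that unreachable case)
def bScan (lst : List Int) (i : Nat) (k : Int) : Int :=
  match lst with
  | [] => 0
  | t :: r => if t ≠ 0 then (if k ≤ 0 then (i : Int) + 1 else bScan r (i + 1) (k - 1)) else bScan r (i + 1) k

-- Python: `while k >= n: d = min(min(t for t in lst if t > 0), k // n); …`.  min over an empty
-- generator raises ValueError (unreachable on admitted inputs: some dish stays positive); `.getD 0`
-- stands in for it.  Fuel k.toNat + 2 suffices: k drops by d*n ≥ 1 on every iteration.
def bLoop (lst : List Int) (k : Int) (n : Int) : Nat → List Int × Int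
  | 0 => (lst, k)
  | fuel+1 =>
    if n ≤ k then
      let m := (PySem.List.min? (lst.filter (fun t => 0 < t)) (fun t => t)).getD 0
      let d := min m (PySem.Int.floordiv k n)
      let lst' := lst.map (fun t => if t ≠ 0 then t - d else t)
      bLoop lst' (k - d * n) (((lst'.filter (fun t => t ≠ 0)).length : Int)) fuel
    else (lst, k)

def solution_alt (food_times : List Int) (k : Int) : Int :=
  if food_times.sum ≤ k then -1
  else
    let st := bLoop food_times k ((food_times.filter (fun t => t ≠ 0)).length : Int) (k.toNat + 2)
    bScan st.1 0 st.2

-- ===== PRECONDITION & SPEC =====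
-- Pre_solution excludes exactly the inputs on which A never RETURNS: with k < 0, sum > k and every
-- dish zero the second while loop scans zeros forever (or, on the empty list, raises IndexError);
-- everywhere A returns a value (including k < 0 with some non-empty dish) is inside Pre_solution.
def Pre_solution (food_times : List Int) (k : Int) : Prop :=
  food_times.sum ≤ k ∨ 0 ≤ k ∨ ∃ t ∈ food_times, t ≠ 0
instance (food_times : List Int) (k : Int) : Decidable (Pre_solution food_times k) := by
  unfold Pre_solution; infer_instance

def pvWitness_solution : List Int × Int := ([3, 1, 2], 5)

def Spec_solution (food_times : List Int) (k : Int) (out : Int) : Prop := out = solution_alt food_times k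
instance (food_times : List Int) (k : Int) (out : Int) : Decidable (Spec_solution food_times k out) := by
  unfold Spec_solution; infer_instance

-- ===== CLAIM (what is proved, stated in full; the proofs are below) =====
def Claim_equal_solution : Prop := ∀ (food_times : List Int) (k : Int), Dom_solution food_times k → Pre_solution food_times k → Spec_solution food_times k (solution food_times k)

-- ===== LEMMAS AND PROOFS =====

-- number of non-empty dishes
def cList (lst : List Int) : Nat := (lst.filter (fun t => t ≠ 0)).length

-- every non-empty dish loses d (d full rounds of eating)
def decBy (d : Int) (lst : List Int) : List Int := lst.map (fun t => if t ≠ 0 then t - d else t)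

-- index of the (k+1)-th non-empty dish, positions counted from i
def ithNz : List Int → Nat → Nat → Nat
  | [], _, _ => 0
  | t :: r, i, k => if t ≠ 0 then (if k = 0 then i else ithNz r (i + 1) (k - 1)) else ithNz r (i + 1) k

-- the common specification: the dish that would receive the (kn+1)-th bite
def specIdx (lst : List Int) (kn : Nat) : Nat :=
  if kn < cList lst then ithNz lst 0 kn
  else if _h : cList lst = 0 then 0
  else specIdx (decBy 1 lst) (kn - cList lst)
termination_by kn
decreasing_by omega

theorem cList_cons (t : Int) (r : List Int) :
    cList (t :: r) = (if t ≠ 0 then 1 else 0) + cList r := by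
  by_cases h : t = 0 <;> simp [cList, h, Nat.add_comm]

theorem cList_append (a b : List Int) : cList (a ++ b) = cList a + cList b := by
  simp [cList]

theorem cList_le_length (r : List Int) : cList r ≤ r.length :=
  List.length_filter_le _ r

theorem cList_eq_zero {r : List Int} (h : cList r = 0) : ∀ t ∈ r, t = 0 := by
  intro t ht
  by_contra hne
  have h1 : t ∈ r.filter (fun t => t ≠ 0) := by simp [List.mem_filter, ht, hne]
  have h2 := List.length_pos_of_mem h1
  unfold cList at h
  omega

theorem cList_pos_of_exists {r : List Int} (h : ∃ t ∈ r, t ≠ 0) : 1 ≤ cList r := by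
  obtain ⟨t, ht, hne⟩ := h
  have h1 : t ∈ r.filter (fun t => t ≠ 0) := by simp [List.mem_filter, ht, hne]
  have := List.length_pos_of_mem h1
  unfold cList
  omega

theorem length_decBy (d : Int) (lst : List Int) : (decBy d lst).length = lst.length := by
  simp [decBy]

theorem decBy_cons (d t : Int) (r : List Int) :
    decBy d (t :: r) = (if t ≠ 0 then t - d else t) :: decBy d r := rfl

theorem decBy_zero (lst : List Int) : decBy 0 lst = lst := by
  simp [decBy]

theorem decBy_all_zero {r : List Int} (d : Int) (h : ∀ t ∈ r, t = 0) : decBy d r = r := by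
  induction r with
  | nil => rfl
  | cons t r ih =>
      rw [decBy_cons, if_neg (by simpa using h t (by simp)), ih (fun u hu => h u (by simp [hu]))]

theorem decBy_decBy (d : Int) (lst : List Int) (h : ∀ t ∈ lst, 0 < t → (2:Int) ≤ t) :
    decBy d (decBy 1 lst) = decBy (d + 1) lst := by
  induction lst with
  | nil => rfl
  | cons t r ih =>
      simp only [decBy_cons]
      rw [ih (fun u hu => h u (by simp [hu]))]
      by_cases ht : t = 0
      · simp [ht]
      · have h2 : 0 < t → (2:Int) ≤ t := h t (by simp)
        have ht1 : t - 1 ≠ 0 := by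
          by_cases hp : 0 < t
          · have := h2 hp; omega
          · omega
        simp [ht, ht1, sub_sub, Int.add_comm]

theorem cList_decBy_one (lst : List Int) (h : ∀ t ∈ lst, 0 < t → (2:Int) ≤ t) :
    cList (decBy 1 lst) = cList lst := by
  induction lst with
  | nil => rfl
  | cons t r ih =>
      rw [decBy_cons, cList_cons, cList_cons, ih (fun u hu => h u (by simp [hu]))]
      by_cases ht : t = 0
      · simp [ht]
      · have h2 : 0 < t → (2:Int) ≤ t := h t (by simp)
        have ht1 : t - 1 ≠ 0 := by
          by_cases hp : 0 < t
          · have := h2 hp; omega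
          · omega
        simp [ht, ht1]

theorem sum_decBy (d : Int) (lst : List Int) :
    (decBy d lst).sum = lst.sum - d * (cList lst : Int) := by
  induction lst with
  | nil => simp [decBy, cList]
  | cons t r ih =>
      rw [decBy_cons, List.sum_cons, List.sum_cons, ih, cList_cons]
      by_cases h : t = 0 <;> simp [h] <;> push_cast <;> ring

theorem sum_pos_cList {lst : List Int} (h : 0 < lst.sum) : 1 ≤ cList lst := by
  induction lst with
  | nil => simp at h
  | cons t r ih =>
      rw [cList_cons]
      by_cases ht : t = 0
      · have hr : 0 < r.sum := by simp [ht] at h; omega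
        have := ih hr
        omega
      · simp [ht]

theorem sum_pos_filter_pos {lst : List Int} (h : 0 < lst.sum) :
    lst.filter (fun t => 0 < t) ≠ [] := by
  induction lst with
  | nil => simp at h
  | cons t r ih =>
      by_cases ht : 0 < t
      · simp [List.filter_cons, ht]
      · have hr : 0 < r.sum := by simp at h; omega
        simpa [List.filter_cons, ht] using ih hr

theorem getD_append_mid (pre : List Int) (t : Int) (rest : List Int) (d : Int) :
    (pre ++ t :: rest).getD pre.length d = t := by
  simp [List.getD, List.getElem?_append_right (Nat.le_refl pre.length)]

theorem set_append_mid (pre : List Int) (t v : Int) (rest : List Int) :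
    (pre ++ t :: rest).set pre.length v = pre ++ v :: rest := by
  rw [List.set_append_right _ _ (Nat.le_refl pre.length)]
  simp

-- ithNz only looks at the first cList-many nonzero entries
theorem ithNz_append (q s : List Int) : ∀ (i k : Nat), k < cList q →
    ithNz (q ++ s) i k = ithNz q i k := by
  induction q with
  | nil => intro i k h; simp [cList] at h
  | cons t r ih =>
      intro i k h
      by_cases ht : t = 0
      · have h' : k < cList r := by rw [cList_cons] at h; simpa [ht] using h
        simpa [ithNz, ht] using ih (i + 1) k h'
      · by_cases hk : k = 0
        · simp [ithNz, ht, hk]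
        · have h' : k - 1 < cList r := by rw [cList_cons] at h; simp [ht] at h; omega
          simpa [ithNz, ht, hk] using ih (i + 1) (k - 1) h'

-- loop1 does nothing once k ≤ 0
theorem loop1_nonpos (N : Nat) (lst : List Int) (k : Int) (i : Nat) (fuel : Nat) (hk : ¬ 0 < k) :
    loop1 N lst k i fuel = (lst, k, i) := by
  cases fuel with
  | zero => rfl
  | succ f => rw [loop1, if_neg hk]

-- B's final scan returns the (k+1)-th nonzero index, 1-based
theorem bScan_eq (lst : List Int) : ∀ (i : Nat) (k : Int), 0 ≤ k → k.toNat < cList lst →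
    bScan lst i k = (ithNz lst i k.toNat : Int) + 1 := by
  induction lst with
  | nil => intro i k _ h; simp [cList] at h
  | cons t r ih =>
      intro i k hk h
      by_cases ht : t = 0
      · have h' : k.toNat < cList r := by rw [cList_cons] at h; simpa [ht] using h
        simpa [bScan, ithNz, ht] using ih (i + 1) k hk h'
      · by_cases hk0 : k ≤ 0
        · have hk00 : k = 0 := le_antisymm hk0 hk
          simp [bScan, ithNz, ht, hk0, hk00]
        · have hnz : ¬ k.toNat = 0 := by omega
          have h' : (k - 1).toNat < cList r := by
            rw [cList_cons] at h; simp [ht] at h; omega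
          have hcc : (k - 1).toNat = k.toNat - 1 := by omega
          simpa [bScan, ithNz, ht, hk0, hnz, hcc] using ih (i + 1) (k - 1) (by omega) h'

-- B's final scan with no bites left (k ≤ 0) returns the first nonzero index, 1-based
theorem bScan_nonpos (lst : List Int) : ∀ (i : Nat) (k : Int), k ≤ 0 → 1 ≤ cList lst →
    bScan lst i k = (ithNz lst i 0 : Nat) + 1 := by
  induction lst with
  | nil => intro i k _ h; simp [cList] at h
  | cons t r ih =>
      intro i k hk h
      by_cases ht : t = 0
      · have h' : 1 ≤ cList r := by rw [cList_cons] at h; simpa [ht] using h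
        simpa [bScan, ithNz, ht] using ih (i + 1) k hk h'
      · simp [bScan, ithNz, ht, hk]

-- scanning forward: loop2 stops at the first nonzero entry, which lies inside q
theorem loop2_finds (q : List Int) : ∀ (pre s : List Int) (N g : Nat),
    N = pre.length + q.length + s.length → 1 ≤ cList q →
    loop2 N (pre ++ q ++ s) pre.length (q.length + g) = ithNz q pre.length 0 := by
  induction q with
  | nil => intro pre s N g _ h; simp [cList] at h
  | cons t q' ih =>
      intro pre s N g hN h
      have hget : (pre ++ (t :: q') ++ s).getD pre.length 0 = t := by
        rw [List.append_assoc]; exact getD_append_mid _ _ _ _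
      rw [show (t :: q').length + g = (q'.length + g) + 1 from by
        simp only [List.length_cons]; omega, loop2]
      by_cases ht : t = 0
      · have hq1 : 1 ≤ cList q' := by rw [cList_cons] at h; simpa [ht] using h
        have hq' : q'.length ≥ 1 := le_trans hq1 (cList_le_length q')
        have hwrap : ¬ pre.length = N - 1 := by simp at hN; omega
        rw [if_pos (by rw [hget, ht]), if_neg hwrap]
        have := ih (pre ++ [t]) s N g (by simp at hN ⊢; omega) hq1
        simp only [List.length_append, List.length_cons, List.length_nil, List.append_assoc,
          List.cons_append, List.nil_append, Nat.add_zero] at this ⊢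
        rw [this]
        simp [ithNz, ht]
      · rw [if_neg (by rw [hget]; exact ht)]
        simp [ithNz, ht]

-- skipping a zero tail: loop2 wraps around to index 0
theorem loop2_wrap (r : List Int) : ∀ (pre : List Int) (N g : Nat),
    r ≠ [] → N = pre.length + r.length → (∀ t ∈ r, t = 0) →
    loop2 N (pre ++ r) pre.length (r.length + g) = loop2 N (pre ++ r) 0 g := by
  induction r with
  | nil => intro pre N g hne _ _; exact absurd rfl hne
  | cons t r' ih =>
      intro pre N g _ hN hz
      have ht : t = 0 := hz t (by simp)
      have hget : (pre ++ t :: r').getD pre.length 0 = t := getD_append_mid _ _ _ _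
      rw [show (t :: r').length + g = (r'.length + g) + 1 from by
        simp only [List.length_cons]; omega, loop2,
        if_pos (by rw [hget, ht])]
      rcases r' with _ | ⟨u, r''⟩
      · rw [if_pos (by simp at hN; omega)]
        norm_num
      · rw [if_neg (by simp at hN; omega)]
        have := ih (pre ++ [t]) N g (by simp) (by simp at hN ⊢; omega)
          (fun u hu => hz u (by simp [hu]))
        simpa [List.append_assoc, List.cons_append] using this

-- A's loops, base round: fewer bites remain than non-empty dishes from position i on —
-- the answer is the (k+1)-th non-empty dish at or after i
theorem runA_base (r : List Int) : ∀ (pre : List Int) (k : Int) (N g1 g2 : Nat),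
    N = pre.length + r.length → 0 ≤ k → k.toNat < cList r →
    loop2 N (loop1 N (pre ++ r) k pre.length (r.length + g1)).1
            (loop1 N (pre ++ r) k pre.length (r.length + g1)).2.2 (r.length + 1 + g2)
      = ithNz r pre.length k.toNat := by
  induction r with
  | nil => intro pre k N g1 g2 _ _ h; simp [cList] at h
  | cons t r' ih =>
      intro pre k N g1 g2 hN hk0 hkc
      have hget : (pre ++ t :: r').getD pre.length 0 = t := getD_append_mid _ _ _ _
      by_cases hk : 0 < k
      · rw [show (t :: r').length + g1 = (r'.length + g1) + 1 from by simp; omega, loop1,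
          if_pos hk]
        simp only [hget]
        by_cases ht : t = 0
        · -- skip a zero dish
          have hc' : k.toNat < cList r' := by rw [cList_cons] at hkc; simpa [ht] using hkc
          have hr' : 1 ≤ r'.length := le_trans (by omega) (cList_le_length r')
          rw [if_neg (by simp [ht]), if_neg (by simp [ht]), if_neg (by simp at hN; omega)]
          have := ih (pre ++ [t]) k N g1 (g2 + 1) (by simp at hN ⊢; omega) hk0 hc'
          simp only [List.length_append, List.length_cons, List.length_nil, List.append_assoc,
            List.cons_append, List.nil_append, Nat.add_zero] at this ⊢
          rw [show r'.length + 1 + 1 + g2 = r'.length + 1 + (g2 + 1) from by omega, this]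
          simp [ithNz, ht]
        · -- take a bite from dish at position pre.length
          have hknz : 1 ≤ k.toNat := by omega
          have hc' : (k - 1).toNat < cList r' := by rw [cList_cons] at hkc; simp [ht] at hkc; omega
          have hr' : 1 ≤ r'.length := le_trans (by omega) (cList_le_length r')
          rw [if_pos ht, if_pos ht, if_neg (by simp at hN; omega), set_append_mid]
          have := ih (pre ++ [t - 1]) (k - 1) N g1 (g2 + 1) (by simp at hN ⊢; omega)
            (by omega) hc'
          simp only [List.length_append, List.length_cons, List.length_nil, List.append_assoc,
            List.cons_append, List.nil_append] at this ⊢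
          rw [show r'.length + 1 + 1 + g2 = r'.length + 1 + (g2 + 1) from by omega, this]
          have hnz0 : ¬ k.toNat = 0 := by omega
          have hcc : (k - 1).toNat = k.toNat - 1 := by omega
          simp [ithNz, ht, hnz0, hcc]
      · -- k = 0: the first loop stops immediately, the scan finds the next non-empty dish
        have hk00 : k.toNat = 0 := by omega
        rw [loop1_nonpos N (pre ++ t :: r') k pre.length ((t :: r').length + g1) hk]
        dsimp only
        have hf := loop2_finds (t :: r') pre [] N (1 + g2)
          (by simp only [List.length_nil]; omega) (by omega)
        simp only [List.append_nil] at hf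
        rw [show (t :: r').length + 1 + g2 = (t :: r').length + (1 + g2) from by omega, hf, hk00]

-- A's first loop, one full strict round: every non-empty dish gets a bite,
-- the pointer returns to 0
theorem loop1_round (r : List Int) : ∀ (pre : List Int) (k : Int) (N g : Nat),
    N = pre.length + r.length → r ≠ [] → (cList r : Int) < k →
    loop1 N (pre ++ r) k pre.length (r.length + g)
      = loop1 N (pre ++ decBy 1 r) (k - cList r) 0 g := by
  induction r with
  | nil => intro pre k N g _ hne _; exact absurd rfl hne
  | cons t r' ih =>
      intro pre k N g hN _ hck
      have hk : 0 < k := lt_of_le_of_lt (by exact_mod_cast Nat.zero_le (cList (t :: r'))) hck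
      have hget : (pre ++ t :: r').getD pre.length 0 = t := getD_append_mid _ _ _ _
      rw [show (t :: r').length + g = (r'.length + g) + 1 from by
        simp only [List.length_cons]; omega, loop1, if_pos hk]
      simp only [hget]
      rcases eq_or_ne t 0 with ht | ht
      · -- zero dish is skipped and stays zero
        rw [if_neg (by simp [ht]), if_neg (by simp [ht])]
        have hRHS : pre ++ decBy 1 (t :: r') = (pre ++ [t]) ++ decBy 1 r' := by
          rw [decBy_cons, if_neg (by simp [ht])]; simp
        have hc : (cList (t :: r') : Int) = (cList r' : Int) := by
          rw [cList_cons]; simp [ht]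
        rcases r' with _ | ⟨u, r''⟩
        · rw [if_pos (by simp at hN; omega), hRHS, hc]
          simp [decBy, cList]
        · rw [if_neg (by simp at hN; omega), hRHS, hc]
          have := ih (pre ++ [t]) k N g (by simp at hN ⊢; omega) (by simp)
            (by rw [← hc]; exact hck)
          simpa [List.append_assoc, List.cons_append, List.length_append] using this
      · -- non-empty dish: one bite
        rw [if_pos ht, if_pos ht, set_append_mid]
        have hRHS : pre ++ decBy 1 (t :: r') = (pre ++ [t - 1]) ++ decBy 1 r' := by
          rw [decBy_cons, if_pos ht]; simp
        have hc : (cList (t :: r') : Int) = (cList r' : Int) + 1 := by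
          rw [cList_cons]; simp [ht]; push_cast; ring
        rcases r' with _ | ⟨u, r''⟩
        · rw [if_pos (by simp at hN; omega), hRHS,
            show k - (cList [t] : Int) = k - 1 from by rw [cList_cons]; simp [ht]]
          simp [decBy, cList]
        · rw [if_neg (by simp at hN; omega), hRHS,
            show k - (cList (t :: u :: r'') : Int) = (k - 1) - (cList (u :: r'') : Int) from by
              rw [hc]; ring]
          have := ih (pre ++ [t - 1]) (k - 1) N g (by simp at hN ⊢; omega) (by simp)
            (by rw [hc] at hck; omega)
          simpa [List.append_assoc, List.cons_append, List.length_append] using this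

-- A's loops, last round (k = number of non-empty dishes): the round zeroes the final dishes
-- and the scan wraps to the first dish left non-empty
theorem runA_round_eq (r : List Int) : ∀ (pre : List Int) (k : Int) (N g1 g2 : Nat),
    N = pre.length + r.length → 1 ≤ cList r → (cList r : Int) = k →
    1 ≤ cList (pre ++ decBy 1 r) →
    loop2 N (loop1 N (pre ++ r) k pre.length (r.length + g1)).1
            (loop1 N (pre ++ r) k pre.length (r.length + g1)).2.2 (N + 1 + g2)
      = ithNz (pre ++ decBy 1 r) 0 0 := by
  induction r with
  | nil => intro pre k N g1 g2 _ h _ _; simp [cList] at h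
  | cons t r' ih =>
      intro pre k N g1 g2 hN hc1 hck hcd
      have hk : 0 < k := by
        have : (1 : Int) ≤ (cList (t :: r') : Int) := by exact_mod_cast hc1
        omega
      have hget : (pre ++ t :: r').getD pre.length 0 = t := getD_append_mid _ _ _ _
      rw [show (t :: r').length + g1 = (r'.length + g1) + 1 from by
        simp only [List.length_cons]; omega, loop1, if_pos hk]
      simp only [hget]
      rcases eq_or_ne t 0 with ht | ht
      · -- zero dish is skipped
        have hc' : cList r' = cList (t :: r') := by rw [cList_cons]; simp [ht]
        have hr1 : 1 ≤ r'.length := le_trans (by omega) (cList_le_length r')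
        rw [if_neg (by simp [ht]), if_neg (by simp [ht]), if_neg (by simp at hN; omega)]
        have hRHS : pre ++ decBy 1 (t :: r') = (pre ++ [t]) ++ decBy 1 r' := by
          rw [decBy_cons, if_neg (by simp [ht])]; simp
        rw [hRHS]
        have := ih (pre ++ [t]) k N g1 g2 (by simp at hN ⊢; omega) (by omega)
          (by rw [hc']; exact hck) (by rw [← hRHS]; exact hcd)
        simpa [List.append_assoc, List.cons_append, List.length_append] using this
      · -- bite the dish at pre.length
        have hc' : (cList r' : Int) = k - 1 := by
          rw [cList_cons] at hck; simp [ht] at hck; push_cast at hck; omega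
        rw [if_pos ht, if_pos ht, set_append_mid]
        have hRHS : pre ++ decBy 1 (t :: r') = (pre ++ [t - 1]) ++ decBy 1 r' := by
          rw [decBy_cons, if_pos ht]; simp
        have hL : pre ++ (t - 1) :: r' = (pre ++ [t - 1]) ++ r' := by simp
        by_cases hz : cList r' = 0
        · -- that was the last bite: k is exhausted
          have hk1 : k = 1 := by omega
          have hr'z : ∀ u ∈ r', u = 0 := cList_eq_zero hz
          have hdec : decBy 1 r' = r' := decBy_all_zero 1 hr'z
          rw [hRHS, hdec, hL, loop1_nonpos N _ (k - 1) _ _ (by omega)]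
          rcases r' with _ | ⟨u, r''⟩
          · rw [if_pos (by simp at hN; omega)]
            dsimp only
            simp only [List.append_nil]
            have hf := loop2_finds (pre ++ [t - 1]) [] [] N (1 + g2)
              (by simp at hN ⊢; omega)
              (by rw [hRHS, hdec] at hcd; simpa using hcd)
            simp only [List.nil_append, List.append_nil, List.length_nil] at hf
            rw [show N + 1 + g2 = (pre ++ [t - 1]).length + (1 + g2) from by
              simp at hN ⊢; omega, hf]
          · rw [if_neg (by simp at hN; omega)]
            dsimp only
            have hq1 : 1 ≤ cList (pre ++ [t - 1]) := by
              have h2 := hcd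
              rw [hRHS, hdec, cList_append] at h2
              have : cList (u :: r'') = 0 := hz
              omega
            have hw := loop2_wrap (u :: r'') (pre ++ [t - 1]) N (pre.length + 2 + g2)
              (by simp) (by simp at hN ⊢; omega) hr'z
            rw [show N + 1 + g2 = (u :: r'').length + (pre.length + 2 + g2) from by
              simp at hN ⊢; omega]
            rw [show pre.length + 1 = (pre ++ [t - 1]).length from by simp]
            rw [hw]
            have hf := loop2_finds (pre ++ [t - 1]) [] (u :: r'') N (1 + g2)
              (by simp at hN ⊢; omega) hq1
            simp only [List.nil_append, List.length_nil] at hf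
            rw [show pre.length + 2 + g2 = (pre ++ [t - 1]).length + (1 + g2) from by
              simp only [List.length_append, List.length_cons, List.length_nil]; omega, hf]
            exact (ithNz_append (pre ++ [t - 1]) (u :: r'') 0 0 (by omega)).symm
        · -- the round continues
          have hr1 : 1 ≤ r'.length := le_trans (by omega) (cList_le_length r')
          rw [if_neg (by simp at hN; omega), hRHS]
          have := ih (pre ++ [t - 1]) (k - 1) N g1 g2 (by simp at hN ⊢; omega) (by omega)
            hc' (by rw [← hRHS]; exact hcd)
          simpa [List.append_assoc, List.cons_append, List.length_append] using this

-- shifting the specification by d full rounds (d at most the minimum positive time)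
theorem spec_shift : ∀ (d : Nat) (lst : List Int) (kn : Nat), 1 ≤ cList lst →
    (∀ t ∈ lst, 0 < t → (d : Int) ≤ t) → d * cList lst ≤ kn →
    specIdx lst kn = specIdx (decBy (d : Int) lst) (kn - d * cList lst) := by
  intro d
  induction d with
  | zero => intro lst kn _ _ _; simp [decBy_zero]
  | succ d ih =>
      intro lst kn hc1 hpos hkn
      have hmul : (d + 1) * cList lst = d * cList lst + cList lst := by
        rw [Nat.succ_mul]
      have hnb : ¬ kn < cList lst := by omega
      have hnz : ¬ cList lst = 0 := by omega
      rw [specIdx, if_neg hnb, dif_neg hnz]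
      rcases Nat.eq_zero_or_pos d with hd0 | hd1
      · subst hd0
        simp only [Nat.zero_add, Nat.one_mul, Nat.cast_one]
      · have h2 : ∀ t ∈ lst, 0 < t → (2 : Int) ≤ t := by
          intro t ht hp
          have := hpos t ht hp
          push_cast at this
          omega
        have hcdec : cList (decBy 1 lst) = cList lst := cList_decBy_one lst h2
        have hposdec : ∀ u ∈ decBy 1 lst, 0 < u → (d : Int) ≤ u := by
          intro u hu hup
          rcases List.mem_map.1 hu with ⟨t, ht, rfl⟩
          by_cases htz : t = 0
          · simp [htz] at hup
          · simp only [if_pos htz] at hup ⊢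
            have : 0 < t := by omega
            have := hpos t ht this
            push_cast at this ⊢
            omega
        have := ih (decBy 1 lst) (kn - cList lst) (by omega)
          (by simpa [hcdec] using hposdec) (by rw [hcdec]; omega)
        rw [this, hcdec, decBy_decBy d lst h2]
        have hcast : ((d : Int) + 1) = ((d + 1 : Nat) : Int) := by push_cast; ring
        rw [hcast]
        congr 1
        omega

-- A's whole else-branch equals the specification
theorem aMain (kt : Nat) : ∀ (lst : List Int) (k : Int) (g1 g2 : Nat),
    k.toNat = kt → 0 ≤ k → k < lst.sum →
    loop2 lst.length (loop1 lst.length lst k 0 ((kt + 1) * (lst.length + 1) + g1)).1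
        (loop1 lst.length lst k 0 ((kt + 1) * (lst.length + 1) + g1)).2.2
        (lst.length + 1 + g2)
      = specIdx lst kt := by
  induction kt using Nat.strong_induction_on with
  | _ kt IH =>
    intro lst k g1 g2 hkt hk0 hks
    have hc1 : 1 ≤ cList lst := sum_pos_cList (by omega)
    have hexp : (kt + 1) * (lst.length + 1) = kt * (lst.length + 1) + (lst.length + 1) := by
      rw [Nat.succ_mul]
    by_cases hbase : kt < cList lst
    · -- fewer bites than dishes: base lemma
      rw [show (kt + 1) * (lst.length + 1) + g1
            = lst.length + (kt * (lst.length + 1) + 1 + g1) from by omega]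
      have := runA_base lst [] k lst.length (kt * (lst.length + 1) + 1 + g1) g2
        (by simp) hk0 (by omega)
      simp only [List.nil_append, List.length_nil] at this
      rw [this, hkt, specIdx, if_pos hbase]
    · -- at least one full round
      have hcle : (cList lst : Int) ≤ k := by omega
      have hlne : lst ≠ [] := by
        intro h; subst h; simp [cList] at hc1
      have hdsum : (decBy 1 lst).sum = lst.sum - (cList lst : Int) := by
        rw [sum_decBy]; ring
      have hspec : specIdx lst kt = specIdx (decBy 1 lst) (kt - cList lst) := by
        rw [specIdx, if_neg hbase, dif_neg (by omega)]
      by_cases heq : (cList lst : Int) = k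
      · -- k = c: the closing-round lemma
        have hcd : 1 ≤ cList (decBy 1 lst) := sum_pos_cList (by rw [hdsum]; omega)
        rw [show (kt + 1) * (lst.length + 1) + g1
              = lst.length + (kt * (lst.length + 1) + 1 + g1) from by omega]
        have := runA_round_eq lst [] k lst.length (kt * (lst.length + 1) + 1 + g1) g2
          (by simp) hc1 heq (by simpa using hcd)
        simp only [List.nil_append, List.length_nil] at this
        rw [this, hspec, show kt - cList lst = 0 from by omega, specIdx, if_pos (by omega)]
      · -- k > c: peel one full round and recurse
        have hlt : (cList lst : Int) < k := lt_of_le_of_ne hcle heq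
        set c := cList lst with hc
        have hkc : c ≤ kt := by omega
        have h1 : (kt + 1) * (lst.length + 1)
            = ((kt - c) + 1) * (lst.length + 1) + c * (lst.length + 1) := by
          rw [← Nat.add_mul]; congr 1; omega
        have h2 : lst.length + 1 ≤ c * (lst.length + 1) :=
          Nat.le_mul_of_pos_left _ (by omega)
        obtain ⟨γ, hγ⟩ : ∃ γ, (kt + 1) * (lst.length + 1) + g1
            = lst.length + (((kt - c) + 1) * (lst.length + 1) + γ) :=
          ⟨(kt + 1) * (lst.length + 1) + g1 - lst.length
              - (((kt - c) + 1) * (lst.length + 1)), by omega⟩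
        rw [hγ]
        have hround := loop1_round lst [] k lst.length
          (((kt - c) + 1) * (lst.length + 1) + γ) (by simp) hlne hlt
        simp only [List.nil_append, List.length_nil] at hround
        rw [hround]
        have hIH := IH (kt - c) (by omega) (decBy 1 lst) (k - c)
          γ g2 (by omega) (by omega) (by rw [hdsum]; omega)
        rw [length_decBy] at hIH
        rw [hIH, hspec]

-- B's whole else-branch equals the specification
theorem bMain (kt : Nat) : ∀ (lst : List Int) (k : Int) (fuel : Nat),
    k.toNat = kt → 0 ≤ k → k < lst.sum → kt + 2 ≤ fuel →
    bScan (bLoop lst k (cList lst : Int) fuel).1 0 (bLoop lst k (cList lst : Int) fuel).2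
      = (specIdx lst kt : Int) + 1 := by
  induction kt using Nat.strong_induction_on with
  | _ kt IH =>
    intro lst k fuel hkt hk0 hks hfuel
    have hc1 : 1 ≤ cList lst := sum_pos_cList (by omega)
    rcases fuel with _ | f
    · omega
    rw [bLoop]
    by_cases hkn : (cList lst : Int) ≤ k
    · rw [if_pos hkn]
      have hposne : lst.filter (fun t => 0 < t) ≠ [] := sum_pos_filter_pos (by omega)
      obtain ⟨m, hm⟩ : ∃ m, PySem.List.min? (lst.filter (fun t => 0 < t)) (fun t => t) = some m := by
        cases hmm : PySem.List.min? (lst.filter (fun t => 0 < t)) (fun t => t) with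
        | none => exact absurd ((PySem.List.min?_eq_none_iff _ _).1 hmm) hposne
        | some m => exact ⟨m, rfl⟩
      have hmmem : m ∈ lst.filter (fun t => 0 < t) := PySem.List.min?_mem hm
      have hmpos : 0 < m := by
        have := (List.mem_filter.1 hmmem).2
        simpa using this
      have hmin : ∀ t ∈ lst, 0 < t → m ≤ t := by
        intro t ht hp
        have := PySem.List.min?_isMin hm t (by simp [List.mem_filter, ht, hp])
        simpa using this
      have hn1 : (1 : Int) ≤ (cList lst : Int) := by exact_mod_cast hc1
      have hq1 : 1 ≤ PySem.Int.floordiv k (cList lst : Int) := by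
        rw [PySem.Int.le_floordiv_iff_mul_le (by omega)]
        omega
      rw [hm]
      simp only [Option.getD_some]
      set d := min m (PySem.Int.floordiv k (cList lst : Int)) with hd
      have hd1 : 1 ≤ d := le_min (by omega) hq1
      have hdm : d ≤ m := min_le_left _ _
      have hdn : d * (cList lst : Int) ≤ k := by
        have : d ≤ PySem.Int.floordiv k (cList lst : Int) := min_le_right _ _
        exact (PySem.Int.le_floordiv_iff_mul_le (by omega)).1 this
      have hdn1 : (1 : Int) ≤ d * (cList lst : Int) := by
        calc (1 : Int) = 1 * 1 := by ring
        _ ≤ d * (cList lst : Int) := by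
            exact mul_le_mul hd1 hn1 (by omega) (by omega)
      have hlst' : lst.map (fun t => if t ≠ 0 then t - d else t) = decBy d lst := rfl
      rw [hlst']
      have hsum' : k - d * (cList lst : Int) < (decBy d lst).sum := by
        rw [sum_decBy]; omega
      have hlt' : (k - d * (cList lst : Int)).toNat < kt := by omega
      have hIH := IH (k - d * (cList lst : Int)).toNat hlt' (decBy d lst)
        (k - d * (cList lst : Int)) f rfl (by omega) hsum' (by omega)
      rw [show (((decBy d lst).filter (fun t => t ≠ 0)).length : Int)
            = (cList (decBy d lst) : Int) from rfl]
      rw [hIH]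
      -- relate the shifted specification back to lst
      have hcast : ((d.toNat : Int)) = d := by omega
      have hprod : ((d.toNat * cList lst : Nat) : Int) = d * (cList lst : Int) := by
        push_cast [hcast]
        ring
      have hshift := spec_shift d.toNat lst kt hc1
        (by intro t ht hp; rw [hcast]; exact le_trans hdm (hmin t ht hp))
        (by omega)
      rw [hcast] at hshift
      rw [show (k - d * (cList lst : Int)).toNat = kt - d.toNat * cList lst from by omega]
      rw [← hshift]
    · rw [if_neg hkn]
      have hklt : k.toNat < cList lst := by omega
      rw [bScan_eq lst 0 k hk0 hklt, hkt, specIdx, if_pos (by omega)]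

-- ===== VERDICT (by name: the statement is the Claim_ definition above) =====
theorem solution_spec : Claim_equal_solution := by
  unfold Claim_equal_solution
  intro ft k _hdom hpre
  unfold Spec_solution solution solution_alt
  by_cases hs : ft.sum ≤ k
  · rw [if_pos hs, if_pos hs]
  · rw [if_neg hs, if_neg hs]
    dsimp only
    rw [show ((ft.filter (fun t => t ≠ 0)).length : Int) = (cList ft : Int) from rfl]
    by_cases hk0 : 0 ≤ k
    · -- nonnegative k: both sides compute the common specification
      have hks : k < ft.sum := by omega
      have hA := aMain k.toNat ft k 0 0 rfl hk0 hks
      have hB := bMain k.toNat ft k (k.toNat + 2) rfl hk0 hks (le_refl _)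
      simp only [Nat.add_zero] at hA
      rw [hA, hB]
    · -- negative k: A's eating loop never runs, both sides return the first non-empty dish
      have hex : ∃ t ∈ ft, t ≠ 0 := by
        rcases hpre with h | h | h
        · exact absurd h hs
        · exact absurd h hk0
        · exact h
      have hc1 : 1 ≤ cList ft := cList_pos_of_exists hex
      -- A: loop1 is a no-op, loop2 scans from index 0
      rw [loop1_nonpos ft.length ft k 0 _ (by omega)]
      dsimp only
      have hf := loop2_finds ft [] [] ft.length 1 (by simp) hc1
      simp only [List.nil_append, List.append_nil, List.length_nil] at hf
      rw [hf]
      -- B: bLoop is a no-op (cList ≥ 1 > k), bScan returns the first non-empty dish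
      have hbl : bLoop ft k (cList ft : Int) (k.toNat + 2) = (ft, k) := by
        have hnle : ¬ (cList ft : Int) ≤ k := by omega
        rcases hfe : k.toNat + 2 with _ | f
        · omega
        · rw [bLoop, if_neg hnle]
      rw [hbl]
      rw [bScan_nonpos ft 0 k (by omega) hc1]
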